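-- pv_equiv track=rewrite | github.com/PKhing/COMP_PROG | 09_MoreDC/09_MoreDC_34.py | pattern6
-- ===== SOURCE A (Python) =====
-- def pattern6(n): # N  0
--     cnt = 1
--     tab = [[0 for j in range(n)]for i in range(n)]
--     for i in range(n):
--         if i%2==0:
--             for j in range(n-i):
--                 tab[j][j+i]=cnt
--                 cnt+=1
--         else:
--             for j in range(n-i-1,-1,-1):
--                 tab[j][j+i]=cnt
--                 cnt+=1
--     return tab
-- ===== SOURCE B (Python) =====
-- def pattern6(n):
--     def val(r, c):
--         if c < r:
--             return 0
--         i = c - r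
--         start = 1 + i * n - i * (i - 1) // 2
--         return start + r if i % 2 == 0 else start + (n - i - 1 - r)
--     return [[val(r, c) for c in range(n)] for r in range(n)]
-- ===== Notes on version B (the rewrite author's own statement) =====
-- stated objective: alternative
-- what changed: Replaces A's stateful walk along each diagonal with a running counter by a direct per-cell closed-form formula (triangular-number start offset plus position, reversed on odd diagonals), computed independently for every cell.
import Mathlib
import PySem

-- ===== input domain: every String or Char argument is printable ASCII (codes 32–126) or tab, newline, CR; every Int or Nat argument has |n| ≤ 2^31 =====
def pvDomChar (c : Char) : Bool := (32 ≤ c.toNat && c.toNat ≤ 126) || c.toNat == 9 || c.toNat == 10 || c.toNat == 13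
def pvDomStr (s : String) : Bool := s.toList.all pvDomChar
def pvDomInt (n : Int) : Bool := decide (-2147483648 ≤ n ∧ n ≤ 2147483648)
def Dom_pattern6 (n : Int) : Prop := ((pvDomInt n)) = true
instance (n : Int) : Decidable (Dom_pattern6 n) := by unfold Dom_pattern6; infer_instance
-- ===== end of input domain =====

-- B replaces A's diagonal walk with a running counter by a closed-form per-cell formula (alternative decomposition, same cost).

-- ===== PORT A =====
-- tab[j][j+i] = v  (all writes are in range in every iteration A performs, so List.set is exact)
def pySetAt (tab : List (List Int)) (r c : Nat) (v : Int) : List (List Int) :=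
  tab.set r (((tab[r]?).getD []).set c v)

-- one body iteration of A's inner loops: write cnt at (j, j+i), cnt += 1
def diagStep (i : Nat) (st : List (List Int) × Int) (j : Nat) : List (List Int) × Int :=
  (pySetAt st.1 j (j + i) st.2, st.2 + 1)

-- one iteration of A's outer loop; range(n-i-1,-1,-1) is exactly (range (n-i)).reverse
def outerStep (N : Nat) (st : List (List Int) × Int) (i : Nat) : List (List Int) × Int :=
  if i % 2 = 0 then (List.range (N - i)).foldl (diagStep i) st
  else ((List.range (N - i)).reverse).foldl (diagStep i) st

-- range(n) for a Python int n (empty when n ≤ 0) is exactly List.range n.toNat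
def pattern6 (n : Int) : List (List Int) :=
  ((List.range n.toNat).foldl (outerStep n.toNat)
    (List.replicate n.toNat (List.replicate n.toNat (0 : Int)), 1)).1

-- ===== PORT B =====
-- closed-form value of cell (r, c) (Source B's val)
def bval (n : Int) (r c : Nat) : Int :=
  if c < r then 0
  else
    let i : Int := (c : Int) - (r : Int)
    let start : Int := 1 + i * n - PySem.Int.floordiv (i * (i - 1)) 2
    if PySem.Int.mod i 2 = 0 then start + (r : Int) else start + (n - i - 1 - (r : Int))

def pattern6_alt (n : Int) : List (List Int) :=
  (List.range n.toNat).map (fun r => (List.range n.toNat).map (fun c => bval n r c))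

-- ===== PRECONDITION & SPEC =====
def Spec_pattern6 (n : Int) (out : List (List Int)) : Prop := out = pattern6_alt n
instance (n : Int) (out : List (List Int)) : Decidable (Spec_pattern6 n out) := by unfold Spec_pattern6; infer_instance

-- ===== CLAIM (what is proved, stated in full; the proofs are below) =====
def Claim_equal_pattern6 : Prop := ∀ (n : Int), Dom_pattern6 n → Spec_pattern6 n (pattern6 n)

-- ===== LEMMAS AND PROOFS =====

-- tab[r][c] read with default 0 (out of range reads 0; only used in range)
def entry (tab : List (List Int)) (r c : Nat) : Int := (((tab[r]?).getD [])[c]?).getD 0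

def Shape (N : Nat) (tab : List (List Int)) : Prop :=
  tab.length = N ∧ ∀ row ∈ tab, row.length = N

-- counter value at the start of diagonal i
def startOf (N i : Nat) : Int := 1 + ((i * N - i * (i - 1) / 2 : Nat) : Int)

-- the intended final matrix, in Nat form
def gv (N r c : Nat) : Int :=
  if c < r then 0
  else if (c - r) % 2 = 0 then startOf N (c - r) + (r : Int)
  else startOf N (c - r) + ((N - (c - r) - 1 - r : Nat) : Int)

theorem shape_pySetAt {N : Nat} {tab : List (List Int)} (h : Shape N tab)
    (r c : Nat) (v : Int) : Shape N (pySetAt tab r c v) := by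
  obtain ⟨h1, h2⟩ := h
  by_cases hr : r < tab.length
  · constructor
    · simpa [pySetAt] using h1
    · intro row hrow
      rcases List.mem_or_eq_of_mem_set hrow with hm | hm
      · exact h2 _ hm
      · subst hm
        rw [List.length_set, List.getElem?_eq_getElem hr]
        exact h2 _ (List.getElem_mem hr)
  · have : pySetAt tab r c v = tab := by
      unfold pySetAt
      exact List.set_eq_of_length_le (by omega)
    rw [this]; exact ⟨h1, h2⟩
theorem entry_pySetAt {N : Nat} {tab : List (List Int)} (h : Shape N tab)
    {r c : Nat} (hr : r < N) (hc : c < N) (v : Int) (r' c' : Nat) :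
    entry (pySetAt tab r c v) r' c' = if r' = r ∧ c' = c then v else entry tab r' c' := by
  obtain ⟨h1, h2⟩ := h
  have hrt : r < tab.length := by omega
  have hrow : tab[r]? = some tab[r] := List.getElem?_eq_getElem hrt
  have hrl : tab[r].length = N := h2 _ (List.getElem_mem hrt)
  unfold entry pySetAt
  by_cases he : r' = r
  · subst he
    rw [List.getElem?_set, if_pos rfl, if_pos hrt, hrow]
    simp only [Option.getD_some]
    rw [List.getElem?_set]
    by_cases hce : c = c'
    · subst hce
      simp [hrl, hc]
    · have hce' : ¬ c' = c := fun h => hce h.symm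
      simp [hce, hce']
  · have he' : ¬ r = r' := fun h => he h.symm
    rw [List.getElem?_set, if_neg he']
    simp [he]

theorem fold_diag_cnt (i : Nat) (js : List Nat) :
    ∀ (tab : List (List Int)) (cnt : Int),
      ((js.foldl (diagStep i) (tab, cnt)).2 = cnt + (js.length : Int)) := by
  induction js with
  | nil => intro tab cnt; simp
  | cons j js ih => intro tab cnt; simp [diagStep, ih]; ring

theorem fold_diag_shape {N : Nat} (i : Nat) (js : List Nat) :
    ∀ (tab : List (List Int)) (cnt : Int), Shape N tab →
      Shape N ((js.foldl (diagStep i) (tab, cnt)).1) := by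
  induction js with
  | nil => intro tab cnt h; simpa using h
  | cons j js ih => intro tab cnt h; exact ih _ _ (shape_pySetAt h _ _ _)

theorem fold_diag_entry {N : Nat} (i : Nat) (js : List Nat) :
    ∀ (tab : List (List Int)) (cnt : Int), Shape N tab → js.Nodup →
      (∀ j ∈ js, j < N ∧ j + i < N) → ∀ r c : Nat,
      entry ((js.foldl (diagStep i) (tab, cnt)).1) r c =
        if c = r + i ∧ r ∈ js then cnt + (js.idxOf r : Int) else entry tab r c := by
  induction js with
  | nil => intro tab cnt _ _ _ r c; simp
  | cons j js ih =>
    intro tab cnt hs hnd hin r c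
    have hj : j < N ∧ j + i < N := hin j (List.mem_cons_self)
    have hnd' : js.Nodup := hnd.of_cons
    have hjn : j ∉ js := (List.nodup_cons.mp hnd).1
    have hstep : (j :: js).foldl (diagStep i) (tab, cnt) =
        js.foldl (diagStep i) (pySetAt tab j (j + i) cnt, cnt + 1) := by
      simp [diagStep]
    rw [hstep]
    rw [ih _ _ (shape_pySetAt hs _ _ _) hnd' (fun x hx => hin x (List.mem_cons_of_mem _ hx)) r c]
    rw [entry_pySetAt hs hj.1 hj.2]
    by_cases hcr : c = r + i
    · by_cases hrj : r = j
      · subst hrj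
        have : r ∉ js := hjn
        simp [hcr, this]
      · have hrj' : ¬ (r = j ∧ c = j + i) := fun h => hrj h.1
        by_cases hmem : r ∈ js
        · have hne : (j == r) = false := by
            simpa using fun h => hrj h.symm
          have : (j :: js).idxOf r = js.idxOf r + 1 := by
            simp [List.idxOf_cons, hne]
          simp only [hcr, hmem, and_true, if_pos, List.mem_cons, hrj, false_or, this]
          push_cast
          ring
        · have hmem' : r ∉ j :: js := by
            simp [List.mem_cons, hrj, hmem]
          rw [if_neg (fun h => hmem h.2), if_neg hrj', if_neg (fun h => hmem' h.2)]
    · have h1 : ¬ (c = r + i ∧ r ∈ js) := fun h => hcr h.1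
      have h2 : ¬ (c = r + i ∧ r ∈ j :: js) := fun h => hcr h.1
      have h3 : ¬ (r = j ∧ c = j + i) := by
        rintro ⟨rfl, rfl⟩; exact hcr rfl
      rw [if_neg h1, if_neg h3, if_neg h2]

theorem idxOf_range' : ∀ (m a r : Nat), a ≤ r → r < a + m →
    (List.range' a m).idxOf r = r - a := by
  intro m
  induction m with
  | zero => intro a r h1 h2; omega
  | succ m ih =>
    intro a r h1 h2
    rw [List.range'_succ]
    by_cases hra : r = a
    · subst hra; simp
    · have : a + 1 ≤ r := by omega
      have hne : (a == r) = false := by simpa using fun h => hra h.symm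
      rw [List.idxOf_cons, hne]
      simp only [cond_false]
      rw [ih (a + 1) r this (by omega)]
      omega

theorem idxOf_range (m r : Nat) (h : r < m) : (List.range m).idxOf r = r := by
  rw [List.range_eq_range']
  simpa using idxOf_range' m 0 r (Nat.zero_le r) (by omega)

theorem idxOf_range_rev : ∀ (m r : Nat), r < m →
    ((List.range m).reverse).idxOf r = m - 1 - r := by
  intro m
  induction m with
  | zero => intro r h; omega
  | succ m ih =>
    intro r h
    have : (List.range (m + 1)).reverse = m :: (List.range m).reverse := by
      rw [List.range_succ]; simp
    rw [this]
    by_cases hrm : r = m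
    · subst hrm; simp
    · have hr : r < m := by omega
      have hne : (m == r) = false := by simpa using fun h => hrm h.symm
      rw [List.idxOf_cons, hne]
      simp only [cond_false]
      rw [ih r hr]
      omega

theorem startOf_succ {N i : Nat} (h : i < N) :
    startOf N (i + 1) = startOf N i + ((N - i : Nat) : Int) := by
  unfold startOf
  have e1 : (i + 1) * i = i * (i - 1) + 2 * i := by
    cases i with
    | zero => simp
    | succ k => simp; ring
  have hmul : i * (i - 1) ≤ i * N := Nat.mul_le_mul_left i (by omega)
  have h3 : (i + 1) * N = i * N + N := Nat.succ_mul i N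
  generalize hq : i * (i - 1) = Q at *
  generalize hp : i * N = P at *
  rw [h3]
  simp only [Nat.add_sub_cancel]
  rw [e1]
  omega

theorem outer_inv (N : Nat) : ∀ i, i ≤ N →
    (Shape N (((List.range i).foldl (outerStep N)
        (List.replicate N (List.replicate N (0 : Int)), 1)).1)) ∧
    (((List.range i).foldl (outerStep N)
        (List.replicate N (List.replicate N (0 : Int)), 1)).2 = startOf N i) ∧
    (∀ r c : Nat, entry (((List.range i).foldl (outerStep N)
        (List.replicate N (List.replicate N (0 : Int)), 1)).1) r c =
      if r ≤ c ∧ c < N ∧ c - r < i then gv N r c else 0) := by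
  intro i
  induction i with
  | zero =>
    intro _
    refine ⟨⟨by simp, ?_⟩, by simp [startOf], ?_⟩
    · intro row hrow
      simp [List.eq_of_mem_replicate hrow]
    · intro r c
      simp only [List.range_zero, List.foldl_nil]
      have : ¬ (r ≤ c ∧ c < N ∧ c - r < 0) := by omega
      rw [if_neg this]
      simp [entry, List.getElem?_replicate]
      split_ifs <;> simp
  | succ i ih =>
    intro hi1
    have hiN : i < N := by omega
    obtain ⟨hs, hcnt, hent⟩ := ih (by omega)
    rw [List.range_succ, List.foldl_append, List.foldl_cons, List.foldl_nil]
    set st := (List.range i).foldl (outerStep N)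
        (List.replicate N (List.replicate N (0 : Int)), 1) with hst
    have heta : (st.1, st.2) = st := rfl
    have hin : ∀ j ∈ List.range (N - i), j < N ∧ j + i < N := by
      intro j hj
      rw [List.mem_range] at hj
      omega
    have hin' : ∀ j ∈ (List.range (N - i)).reverse, j < N ∧ j + i < N := by
      intro j hj
      exact hin j (List.mem_reverse.mp hj)
    by_cases hpar : i % 2 = 0
    · -- even diagonal: left-to-right
      have hshape := fold_diag_shape (N := N) i (List.range (N - i)) st.1 st.2 hs
      have hcnt' := fold_diag_cnt i (List.range (N - i)) st.1 st.2
      have hentry := fold_diag_entry (N := N) i (List.range (N - i)) st.1 st.2 hs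
        (List.nodup_range) hin
      rw [heta] at hshape hcnt' hentry
      refine ⟨by simpa [outerStep, hpar] using hshape, ?_, ?_⟩
      · simp only [outerStep]
        rw [if_pos hpar]
        rw [hcnt', hcnt, List.length_range, startOf_succ hiN]
      · intro r c
        simp only [outerStep]
        rw [if_pos hpar]
        rw [hentry r c, hent r c]
        by_cases hA : c = r + i ∧ r < N - i
        · obtain ⟨hc1, hc2⟩ := hA
          subst hc1
          rw [if_pos ⟨rfl, List.mem_range.mpr hc2⟩, idxOf_range _ _ hc2,
            if_pos (by omega : r ≤ r + i ∧ r + i < N ∧ r + i - r < i + 1)]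
          simp only [gv, Nat.add_sub_cancel_left, hcnt]
          rw [if_neg (by omega : ¬ r + i < r), if_pos hpar]
        · have hA1 : ¬ (c = r + i ∧ r ∈ List.range (N - i)) := by
            rw [List.mem_range]; exact hA
          rw [if_neg hA1]
          by_cases hB : r ≤ c ∧ c < N ∧ c - r < i
          · rw [if_pos hB, if_pos (by omega : r ≤ c ∧ c < N ∧ c - r < i + 1)]
          · rw [if_neg hB]
            have : ¬ (r ≤ c ∧ c < N ∧ c - r < i + 1) := by
              rintro ⟨h1, h2, h3⟩
              exact hA ⟨by omega, by omega⟩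
            rw [if_neg this]
    · -- odd diagonal: right-to-left
      have hshape := fold_diag_shape (N := N) i ((List.range (N - i)).reverse) st.1 st.2 hs
      have hcnt' := fold_diag_cnt i ((List.range (N - i)).reverse) st.1 st.2
      have hentry := fold_diag_entry (N := N) i ((List.range (N - i)).reverse) st.1 st.2 hs
        (List.nodup_reverse.mpr List.nodup_range) hin'
      rw [heta] at hshape hcnt' hentry
      refine ⟨by simpa [outerStep, hpar] using hshape, ?_, ?_⟩
      · simp only [outerStep]
        rw [if_neg hpar]
        rw [hcnt', hcnt, List.length_reverse, List.length_range, startOf_succ hiN]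
      · intro r c
        simp only [outerStep]
        rw [if_neg hpar]
        rw [hentry r c, hent r c]
        by_cases hA : c = r + i ∧ r < N - i
        · obtain ⟨hc1, hc2⟩ := hA
          subst hc1
          rw [if_pos ⟨rfl, List.mem_reverse.mpr (List.mem_range.mpr hc2)⟩,
            idxOf_range_rev _ _ hc2,
            if_pos (by omega : r ≤ r + i ∧ r + i < N ∧ r + i - r < i + 1)]
          simp only [gv, Nat.add_sub_cancel_left, hcnt]
          rw [if_neg (by omega : ¬ r + i < r), if_neg hpar]
        · have hA1 : ¬ (c = r + i ∧ r ∈ (List.range (N - i)).reverse) := by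
            rw [List.mem_reverse, List.mem_range]; exact hA
          rw [if_neg hA1]
          by_cases hB : r ≤ c ∧ c < N ∧ c - r < i
          · rw [if_pos hB, if_pos (by omega : r ≤ c ∧ c < N ∧ c - r < i + 1)]
          · rw [if_neg hB]
            have : ¬ (r ≤ c ∧ c < N ∧ c - r < i + 1) := by
              rintro ⟨h1, h2, h3⟩
              exact hA ⟨by omega, by omega⟩
            rw [if_neg this]

theorem bval_eq_gv (N r c : Nat) (_hr : r < N) (hc : c < N) :
    bval ((N : Nat) : Int) r c = if r ≤ c then gv N r c else 0 := by
  by_cases hcr : c < r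
  · rw [bval, if_pos hcr, if_neg (by omega : ¬ r ≤ c)]
  · rw [bval, if_neg hcr, if_pos (by omega : r ≤ c)]
    have hi : (c : Int) - (r : Int) = ((c - r : Nat) : Int) := by omega
    set d := c - r with hd
    have hdN : d < N := by omega
    have hprod : ((d : Nat) : Int) * (((d : Nat) : Int) - 1) = ((d * (d - 1) : Nat) : Int) := by
      cases d with
      | zero => simp
      | succ k => push_cast; ring_nf
    have hfd : PySem.Int.floordiv (((d * (d - 1) : Nat)) : Int) 2 = (((d * (d - 1)) / 2 : Nat) : Int) := by
      exact_mod_cast PySem.Int.floordiv_natCast (d * (d - 1)) 2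
    have hmod : PySem.Int.mod ((d : Nat) : Int) 2 = ((d % 2 : Nat) : Int) := by
      exact_mod_cast PySem.Int.mod_natCast d 2
    have hT : d * (d - 1) / 2 ≤ d * N :=
      le_trans (Nat.div_le_self _ _) (Nat.mul_le_mul_left d (by omega))
    simp only [hi, hprod, hfd, hmod]
    rw [gv, if_neg hcr, ← hd]
    generalize hTv : d * (d - 1) / 2 = T at *
    generalize hPv : d * N = P at *
    rw [startOf]
    by_cases hp : d % 2 = 0
    · rw [if_pos (by exact_mod_cast congrArg (Nat.cast : Nat → Int) hp), if_pos hp]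
      omega
    · rw [if_neg (by exact_mod_cast fun h => hp (by exact_mod_cast h)), if_neg hp]
      omega

theorem main_eq (n : Int) : pattern6 n = pattern6_alt n := by
  obtain ⟨hs, -, hent⟩ := outer_inv n.toNat n.toNat le_rfl
  unfold pattern6 pattern6_alt
  set N := n.toNat with hNdef
  set st := (List.range N).foldl (outerStep N)
      (List.replicate N (List.replicate N (0 : Int)), 1) with hst
  apply List.ext_getElem
  · simp [hs.1]
  · intro r h1 h2
    have hrN : r < N := by simpa using h2
    have hn : ((N : Nat) : Int) = n := by omega
    have hrowlen : st.1[r].length = N := hs.2 _ (List.getElem_mem h1)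
    simp only [List.getElem_map, List.getElem_range]
    apply List.ext_getElem
    · simp [hrowlen]
    · intro c h3 h4
      have hcN : c < N := by simpa [hrowlen] using h3
      simp only [List.getElem_map, List.getElem_range]
      have he : st.1[r][c] = entry st.1 r c := by
        simp [entry, h1, h3]
      rw [he, hent r c, ← hn, bval_eq_gv N r c hrN hcN]
      by_cases hrc : r ≤ c
      · rw [if_pos ⟨hrc, hcN, by omega⟩, if_pos hrc]
      · rw [if_neg (fun h => hrc h.1), if_neg hrc]

-- ===== VERDICT (by name: the statement is the Claim_ definition above) =====
theorem pattern6_spec : Claim_equal_pattern6 := by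
  intro n _
  unfold Spec_pattern6
  exact main_eq n
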